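-- pv_equiv track=rewrite | github.com/ifecog/Data-Structures-LeetCode-HackerRank | U/best_time_to_buy_and_sell_stock.py | can_place_blocks
-- ===== SOURCE A (Python) =====
-- import bisect
--
-- def can_place_blocks(queries):
--     obstacles = [0]
--     result = []
--
--     for q in queries:
--         if q[0] == 1:
--             x = q[1]
--             bisect.insort(obstacles, x)
--
--         elif q[0] == 2:
--             x, sz = q[1], q[2]
--             can_place = False
--
--             idx = bisect.bisect_right(obstacles, x)
--
--             for i in range(1, idx):
--                 if obstacles[i] - obstacles[i - 1] >= sz:
--                     can_place = True
--                     break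
--
--             if not can_place:
--                 last_obstacle = obstacles[idx - 1] if idx > 0 else 0
--
--                 if x - last_obstacle >= sz:
--                     can_place = True
--
--             result.append(can_place)
--
--     return result
-- ===== SOURCE B (Python) =====
-- def can_place_blocks(queries):
--     obs = []      # obstacles in insertion order, never sorted on insert
--     out = []
--     for q in queries:
--         if q[0] == 1:
--             obs.append(q[1])
--         elif q[0] == 2:
--             x, sz = q[1], q[2]
--             # all relevant positions: the wall at 0 and every obstacle at or before x
--             pts = sorted(o for o in [0] + obs if o <= x) or [0]
--             ok = False
--             prev = pts[0]
--             for p in pts[1:] + [x]: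
--                 if p - prev >= sz:
--                     ok = True
--                     break
--                 prev = p
--             out.append(ok)
--     return out
-- ===== Notes on version B (the rewrite author's own statement) =====
-- stated objective: alternative
-- what changed: B drops the bisect-sorted running list: it keeps obstacles as an unsorted append-only list and answers each type-2 query independently by filtering the obstacles at or before x, sorting them once with the wall at 0, and scanning consecutive gaps (including the final gap up to x), instead of A's insort maintenance plus index-based prefix scan with a separate last-obstacle fallback.
import Mathlib
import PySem

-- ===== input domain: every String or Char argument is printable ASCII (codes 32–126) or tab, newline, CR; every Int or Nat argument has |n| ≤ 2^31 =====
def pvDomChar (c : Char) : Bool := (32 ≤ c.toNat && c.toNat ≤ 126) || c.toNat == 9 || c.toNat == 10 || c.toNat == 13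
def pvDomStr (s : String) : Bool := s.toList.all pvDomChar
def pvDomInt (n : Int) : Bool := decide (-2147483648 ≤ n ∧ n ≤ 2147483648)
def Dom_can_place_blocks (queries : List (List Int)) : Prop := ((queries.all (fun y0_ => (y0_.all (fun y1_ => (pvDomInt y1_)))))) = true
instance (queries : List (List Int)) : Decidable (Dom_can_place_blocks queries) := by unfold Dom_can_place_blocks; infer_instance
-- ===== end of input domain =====

-- B replaces A's incrementally insort-maintained sorted list and index-prefix scan by an
-- unsorted append-only obstacle list with a per-query filter + sort + gap scan (alternative
-- decomposition of the same cost; not claimed faster).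

-- ===== PORT A =====
-- bisect.insort(obstacles, x): insert x after the last element ≤ x (stdlib call, ported by its contract via PySem.List.bisectRight)
def pvA_insort (obs : List Int) (x : Int) : List Int :=
  let i := PySem.List.bisectRight obs x
  obs.take i ++ x :: obs.drop i

-- the inner 'for i in range(1, idx): if obstacles[i] - obstacles[i-1] >= sz: …break' loop
def pvA_loop (obs : List Int) (sz : Int) : List Int → Bool
  | [] => false
  | i :: rest =>
    if sz ≤ PySem.List.pyGetD obs i 0 - PySem.List.pyGetD obs (i - 1) 0 then true
    else pvA_loop obs sz rest

-- the body of A's 'elif q[0] == 2' branch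
def pvA_query2 (obs : List Int) (x sz : Int) : Bool :=
  let idx : Nat := PySem.List.bisectRight obs x
  let can1 := pvA_loop obs sz (PySem.List.pyRange 1 (idx : Int) 1)
  if can1 then true
  else
    let last : Int := if (0 : Int) < (idx : Int) then PySem.List.pyGetD obs ((idx : Int) - 1) 0 else 0
    decide (sz ≤ x - last)

def pvA_go (qs : List (List Int)) (obs : List Int) : List Bool :=
  match qs with
  | [] => []
  | q :: rest =>
    if PySem.List.pyGetD q 0 0 = 1 then
      pvA_go rest (pvA_insort obs (PySem.List.pyGetD q 1 0))
    else if PySem.List.pyGetD q 0 0 = 2 then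
      pvA_query2 obs (PySem.List.pyGetD q 1 0) (PySem.List.pyGetD q 2 0) :: pvA_go rest obs
    else pvA_go rest obs

def can_place_blocks (queries : List (List Int)) : List Bool :=
  pvA_go queries [0]

-- ===== PORT B =====
-- the 'for p in pts[1:] + [x]' gap scan with break
def pvB_gapscan (prev sz : Int) : List Int → Bool
  | [] => false
  | p :: rest => if sz ≤ p - prev then true else pvB_gapscan p sz rest

-- the body of B's 'elif q[0] == 2' branch
def pvB_query2 (obs : List Int) (x sz : Int) : Bool :=
  let pts0 := PySem.List.sorted ((0 :: obs).filter (fun o => decide (o ≤ x))) (fun o => o) false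
  let pts := if pts0 = [] then [0] else pts0
  match pts with
  | [] => false  -- unreachable: pts is nonempty by construction
  | p :: rest => pvB_gapscan p sz (rest ++ [x])

def pvB_go (qs : List (List Int)) (obs : List Int) : List Bool :=
  match qs with
  | [] => []
  | q :: rest =>
    if PySem.List.pyGetD q 0 0 = 1 then
      pvB_go rest (obs ++ [PySem.List.pyGetD q 1 0])
    else if PySem.List.pyGetD q 0 0 = 2 then
      pvB_query2 obs (PySem.List.pyGetD q 1 0) (PySem.List.pyGetD q 2 0) :: pvB_go rest obs
    else pvB_go rest obs

def can_place_blocks_alt (queries : List (List Int)) : List Bool :=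
  pvB_go queries []

-- ===== PRECONDITION & SPEC =====
-- Pre_ excludes exactly the inputs on which Python A raises IndexError: a query shorter
-- than its opcode requires ([], [1] alone, [2] with fewer than two arguments).
def Pre_can_place_blocks (queries : List (List Int)) : Prop :=
  ∀ q ∈ queries, q ≠ [] ∧ (q.headD 0 = 1 → 2 ≤ q.length) ∧ (q.headD 0 = 2 → 3 ≤ q.length)
instance (queries : List (List Int)) : Decidable (Pre_can_place_blocks queries) := by
  unfold Pre_can_place_blocks; infer_instance

def pvWitness_can_place_blocks : List (List Int) := [[1, 2], [2, 4, 2], [2, 1, 2]]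

def Spec_can_place_blocks (queries : List (List Int)) (out : List Bool) : Prop := out = can_place_blocks_alt queries
instance (queries : List (List Int)) (out : List Bool) : Decidable (Spec_can_place_blocks queries out) := by unfold Spec_can_place_blocks; infer_instance

-- ===== CLAIM (what is proved, stated in full; the proofs are below) =====
def Claim_equal_can_place_blocks : Prop := ∀ (queries : List (List Int)), Dom_can_place_blocks queries → Pre_can_place_blocks queries → Spec_can_place_blocks queries (can_place_blocks queries)

-- ===== LEMMAS AND PROOFS =====

-- gap scan with the final position x appended = gap scan of the list, or-else the last gap up to x
lemma gapscan_append (sz x : Int) : ∀ (l : List Int) (prev : Int),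
    pvB_gapscan prev sz (l ++ [x]) =
      (pvB_gapscan prev sz l || decide (sz ≤ x - l.getLastD prev)) := by
  intro l
  induction l with
  | nil => intro prev; simp [pvB_gapscan]
  | cons a l' ih =>
    intro prev
    simp only [List.cons_append, pvB_gapscan, List.getLastD_cons]
    split_ifs with h
    · simp
    · exact ih a

-- A's index loop over range(k+1, k+1+|rest|) on obs, where obs from position k on reads
-- p :: rest ++ t, computes B's structural gap scan starting at p.
lemma loop_eq_gapscan (obs : List Int) (sz : Int) : ∀ (rest : List Int) (k : Nat) (p : Int) (t : List Int),
    obs.drop k = p :: (rest ++ t) →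
    pvA_loop obs sz (PySem.List.pyRange ((k : Int) + 1) ((k : Int) + 1 + rest.length) 1) =
      pvB_gapscan p sz rest := by
  intro rest
  induction rest with
  | nil =>
    intro k p t _h
    rw [PySem.List.pyRange_one_eq_nil (by simp only [List.length_nil, Nat.cast_zero, add_zero]; omega)]
    simp [pvA_loop, pvB_gapscan]
  | cons b r ih =>
    intro k p t h
    have hk : obs[k]? = some p := by
      have := congrArg (fun l => l[0]?) h
      simpa using this
    have hdropk1 : obs.drop (k + 1) = b :: (r ++ t) := by
      rw [← List.drop_drop, h]; rfl
    have hk1 : obs[k + 1]? = some b := by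
      have := congrArg (fun l => l[0]?) hdropk1
      simpa using this
    rw [PySem.List.pyRange_one_cons (by simp only [List.length_cons]; push_cast; omega)]
    simp only [pvA_loop, pvB_gapscan]
    have e1 : PySem.List.pyGetD obs ((k : Int) + 1) 0 = b := by
      have hq : ((k : Int) + 1) = ((k + 1 : Nat) : Int) := by push_cast; ring
      rw [hq, PySem.List.pyGetD_natCast]
      simp [List.getD_eq_getElem?_getD, hk1]
    have e2 : PySem.List.pyGetD obs ((k : Int) + 1 - 1) 0 = p := by
      have hq : ((k : Int) + 1 - 1) = ((k : Nat) : Int) := by ring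
      rw [hq, PySem.List.pyGetD_natCast]
      simp [List.getD_eq_getElem?_getD, hk]
    rw [e1, e2]
    split_ifs with hgap
    · rfl
    · have hrec := ih (k + 1) b t hdropk1
      have hb1 : ((k : Int) + 1 + 1) = (((k + 1 : Nat) : Int) + 1) := by push_cast; ring
      have hb2 : ((k : Int) + 1 + ((b :: r).length : Int)) = (((k + 1 : Nat) : Int) + 1 + (r.length : Int)) := by
        simp only [List.length_cons]; push_cast; ring
      rw [hb1, hb2]
      exact hrec

-- B's filtered-and-sorted point list equals A's bisect prefix of the sorted list
lemma sorted_filter_eq_take (l : List Int) (x : Int) :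
    PySem.List.sorted (l.filter (fun o => decide (o ≤ x))) (fun o => o) false =
      (PySem.List.sorted l (fun o => o) false).take
        (PySem.List.bisectRight (PySem.List.sorted l (fun o => o) false) x) := by
  set s := PySem.List.sorted l (fun o => o) false with hs
  have hsort : s.Pairwise (fun a b : Int => a ≤ b) := by
    simpa using PySem.List.sorted_pairwise l (fun o => o)
  set idx := PySem.List.bisectRight s x with hidx
  obtain ⟨hle, hlo, hhi⟩ := PySem.List.bisectRight_spec s x hsort
  have htake_le : ∀ a ∈ s.take idx, a ≤ x := by
    intro a ha
    obtain ⟨j, hj, he⟩ := List.getElem_of_mem ha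
    have hj' : j < idx := lt_of_lt_of_le hj (by simp)
    have hjs : j < s.length := lt_of_lt_of_le hj' hle
    have := hlo j hjs hj'
    rwa [← List.getElem_take (h := hj), he] at this
  have hdrop_gt : ∀ a ∈ s.drop idx, x < a := by
    intro a ha
    obtain ⟨j, hj, he⟩ := List.getElem_of_mem ha
    have hjs : idx + j < s.length := by simp at hj; omega
    have := hhi (idx + j) hjs (by omega)
    rwa [← List.getElem_drop (h := hj), he] at this
  have htake : s.take idx = s.filter (fun o => decide (o ≤ x)) := by
    conv_rhs => rw [← List.take_append_drop idx s]
    rw [List.filter_append]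
    rw [List.filter_eq_self.2 (fun a ha => by simpa using htake_le a ha)]
    rw [List.filter_eq_nil_iff.2 (fun a ha => by simpa using not_le.2 (hdrop_gt a ha))]
    simp
  apply PySem.List.sorted_id_eq_of_perm_of_pairwise
  · rw [htake]
    exact (PySem.List.sorted_perm l (fun o => o) false).filter _
  · exact List.Pairwise.sublist (List.take_sublist idx s) hsort

-- inserting v into sorted(l) at the bisect position = sorted(l ++ [v])
lemma insort_sorted (l : List Int) (v : Int) :
    pvA_insort (PySem.List.sorted l (fun o => o) false) v =
      PySem.List.sorted (l ++ [v]) (fun o => o) false := by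
  set s := PySem.List.sorted l (fun o => o) false with hs
  have hsort : s.Pairwise (fun a b : Int => a ≤ b) := by
    simpa using PySem.List.sorted_pairwise l (fun o => o)
  set i := PySem.List.bisectRight s v with hi
  obtain ⟨hle, hlo, hhi⟩ := PySem.List.bisectRight_spec s v hsort
  have htake_le : ∀ a ∈ s.take i, a ≤ v := by
    intro a ha
    obtain ⟨j, hj, he⟩ := List.getElem_of_mem ha
    have hj' : j < i := lt_of_lt_of_le hj (by simp)
    have hjs : j < s.length := lt_of_lt_of_le hj' hle
    have := hlo j hjs hj'
    rwa [← List.getElem_take (h := hj), he] at this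
  have hdrop_gt : ∀ a ∈ s.drop i, v < a := by
    intro a ha
    obtain ⟨j, hj, he⟩ := List.getElem_of_mem ha
    have hjs : i + j < s.length := by simp at hj; omega
    have := hhi (i + j) hjs (by omega)
    rwa [← List.getElem_drop (h := hj), he] at this
  symm
  apply PySem.List.sorted_id_eq_of_perm_of_pairwise
  · show (s.take i ++ v :: s.drop i).Perm (l ++ [v])
    have p1 : (s.take i ++ v :: s.drop i).Perm (v :: s) := by
      have h := @List.perm_middle _ v (s.take i) (s.drop i)
      simpa [List.take_append_drop] using h
    exact p1.trans (((PySem.List.sorted_perm l (fun o => o) false).cons v).trans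
      (List.perm_append_singleton v l).symm)
  · show (s.take i ++ v :: s.drop i).Pairwise (fun a b : Int => a ≤ b)
    rw [List.pairwise_append]
    refine ⟨List.Pairwise.sublist (List.take_sublist i s) hsort, ?_, ?_⟩
    · rw [List.pairwise_cons]
      exact ⟨fun b hb => le_of_lt (hdrop_gt b hb), List.Pairwise.sublist (List.drop_sublist i s) hsort⟩
    · intro a ha b hb
      rcases List.mem_cons.1 hb with rfl | hb'
      · exact htake_le a ha
      · exact le_trans (htake_le a ha) (le_of_lt (hdrop_gt b hb'))

-- per type-2 query, A on the sorted obstacle list agrees with B on the raw list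
lemma query2_eq (raw : List Int) (x sz : Int) :
    pvA_query2 (PySem.List.sorted (0 :: raw) (fun o => o) false) x sz = pvB_query2 raw x sz := by
  simp only [pvA_query2, pvB_query2]
  rw [sorted_filter_eq_take (0 :: raw) x]
  set s := PySem.List.sorted (0 :: raw) (fun o => o) false with hs
  set idx := PySem.List.bisectRight s x with hidx
  have hsort : s.Pairwise (fun a b : Int => a ≤ b) := by
    rw [hs]; simpa using PySem.List.sorted_pairwise (0 :: raw) (fun o => o)
  obtain ⟨hle, _hlo, _hhi⟩ := PySem.List.bisectRight_spec s x hsort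
  rw [← hidx] at hle
  by_cases h0 : idx = 0
  · rw [h0]
    rw [PySem.List.pyRange_one_eq_nil (by norm_num)]
    simp [pvA_loop, pvB_gapscan]
  · have hidxpos : 0 < idx := Nat.pos_of_ne_zero h0
    have hlen : (s.take idx).length = idx := by
      rw [List.length_take]; omega
    obtain ⟨p, rest, hpr⟩ : ∃ p rest, s.take idx = p :: rest := by
      cases hc : s.take idx with
      | nil => rw [hc] at hlen; simp at hlen; omega
      | cons p rest => exact ⟨p, rest, rfl⟩
    have hrestlen : rest.length + 1 = idx := by
      rw [hpr] at hlen; simpa using hlen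
    have hsplit : s.drop 0 = p :: (rest ++ s.drop idx) := by
      rw [List.drop_zero]
      conv_lhs => rw [← List.take_append_drop idx s, hpr]
      simp
    have hloop : pvA_loop s sz (PySem.List.pyRange 1 (idx : Int) 1) = pvB_gapscan p sz rest := by
      have := loop_eq_gapscan s sz rest 0 p (s.drop idx) hsplit
      have harith : ((0 : Nat) : Int) + 1 + (rest.length : Int) = (idx : Int) := by
        push_cast; omega
      rwa [harith] at this
    have hlast : PySem.List.pyGetD s ((idx : Int) - 1) 0 = rest.getLastD p := by
      have hq : ((idx : Int) - 1) = ((idx - 1 : Nat) : Int) := by omega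
      rw [hq, PySem.List.pyGetD_natCast]
      have h1 : s[idx - 1]? = (s.take idx)[idx - 1]? := (List.getElem?_take_of_lt (by omega)).symm
      have h2 : (s.take idx)[idx - 1]? = some (rest.getLastD p) := by
        rw [hpr]
        have : idx - 1 = rest.length := by omega
        rw [this]
        have : (p :: rest)[rest.length]? = (p :: rest).getLast? := by
          rw [List.getLast?_eq_getElem?]; simp
        rw [this, List.getLast?_cons]
        simp [List.getLastD_eq_getLast?]
      simp [List.getD_eq_getElem?_getD, h1, h2]
    rw [hpr]
    simp only [hloop, hlast]
    have hne : (p :: rest) ≠ ([] : List Int) := by simp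
    simp only [if_neg hne]
    rw [gapscan_append sz x rest p]
    have hpos' : (0 : Int) < (idx : Int) := by exact_mod_cast hidxpos
    rw [if_pos hpos']
    cases hg : pvB_gapscan p sz rest <;> simp

-- main invariant: A's state is always sorted(0 :: B's raw state)
lemma go_eq : ∀ (qs : List (List Int)) (raw : List Int),
    pvA_go qs (PySem.List.sorted (0 :: raw) (fun o => o) false) = pvB_go qs raw := by
  intro qs
  induction qs with
  | nil => intro raw; rfl
  | cons q rest ih =>
    intro raw
    unfold pvA_go pvB_go
    split_ifs with h1 h2
    · have hrec := ih (raw ++ [PySem.List.pyGetD q 1 0])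
      rw [show (0 :: (raw ++ [PySem.List.pyGetD q 1 0])) = ((0 :: raw) ++ [PySem.List.pyGetD q 1 0]) from rfl,
         ← insort_sorted (0 :: raw) (PySem.List.pyGetD q 1 0)] at hrec
      exact hrec
    · rw [query2_eq, ih]
    · exact ih raw

-- ===== VERDICT (by name: the statement is the Claim_ definition above) =====
theorem can_place_blocks_spec : Claim_equal_can_place_blocks := by
  intro queries _dom _pre
  unfold Spec_can_place_blocks can_place_blocks can_place_blocks_alt
  have h0 : ([0] : List Int) = PySem.List.sorted (0 :: ([] : List Int)) (fun o => o) false := by decide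
  rw [h0, go_eq queries []]
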